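-- pv_equiv track=rewrite | github.com/AnushaChikkamath/APS-codes | 16- finding_duplicate.py | finding_only_duplicate
-- ===== SOURCE A (Python) =====
-- def finding_only_duplicate(arr):
--   fast=arr[0]
--   slow=arr[0]
--   while True:
--     slow=arr[slow]
--     fast=arr[arr[fast]]
--     if(slow==fast):
--       break
--
--   fast=arr[0]
--   while slow!=fast:
--     fast=arr[fast]
--     slow=arr[slow]
--   return slow
-- ===== SOURCE B (Python) =====
-- def finding_only_duplicate(arr):
--   slow = arr[0]
--   seen = set()
--   while slow not in seen:
--     seen.add(slow)
--     slow = arr[slow]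
--   return slow
-- ===== Notes on version B (the rewrite author's own statement) =====
-- stated objective: idiomatic
-- what changed: Replaces Floyd's two-phase tortoise-and-hare cycle detection with a single chained walk from the first element that records visited values in a set and returns the first value seen twice (the cycle entrance).
-- outside the precondition, e.g. on finding_only_duplicate([0, 2]): A returns 0, B returns 0
import Mathlib
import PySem

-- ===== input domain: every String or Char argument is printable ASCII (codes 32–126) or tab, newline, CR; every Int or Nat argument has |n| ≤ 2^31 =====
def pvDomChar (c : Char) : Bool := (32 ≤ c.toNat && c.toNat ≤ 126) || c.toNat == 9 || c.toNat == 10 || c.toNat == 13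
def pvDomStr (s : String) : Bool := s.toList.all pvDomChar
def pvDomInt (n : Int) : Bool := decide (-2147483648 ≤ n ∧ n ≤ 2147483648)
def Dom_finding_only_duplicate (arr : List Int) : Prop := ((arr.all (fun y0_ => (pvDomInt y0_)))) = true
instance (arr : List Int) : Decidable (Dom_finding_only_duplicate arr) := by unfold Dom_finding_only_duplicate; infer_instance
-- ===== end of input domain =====

-- B replaces Floyd's two-phase tortoise-and-hare cycle detection by a single chained walk
-- from the first element, recording visited values in a set; both return the walk's cycle entrance.


-- shared indexing helper: Python list indexing (a negative index counts from the end);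
-- the default 0 is dead code under Pre_ (every index in range there)
def pyf (arr : List Int) (i : Int) : Int := PySem.List.pyGetD arr i 0

-- ===== PORT A =====
-- first while-loop of A: slow one step, fast two, stop when equal (body runs before the
-- test, as in Python); fuel `arr.length + 1` is proved sufficient under Pre_
def floydPhase1 (arr : List Int) (slow fast : Int) : Nat → Int
  | 0 => slow
  | fuel + 1 =>
    let slow' := pyf arr slow
    let fast' := pyf arr (pyf arr fast)
    if slow' = fast' then slow' else floydPhase1 arr slow' fast' fuel

-- second while-loop of A: advance both one step until they meet; return slow
def floydPhase2 (arr : List Int) (slow fast : Int) : Nat → Int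
  | 0 => slow
  | fuel + 1 =>
    if slow ≠ fast then floydPhase2 arr (pyf arr slow) (pyf arr fast) fuel else slow

def finding_only_duplicate (arr : List Int) : Int :=
  let s := pyf arr 0
  let slow := floydPhase1 arr s s (arr.length + 1)
  floydPhase2 arr slow s (arr.length + 1)

-- ===== PORT B =====
-- B's single while-loop: walk, adding each visited value to the seen set, return first repeat
def walkSeen (arr : List Int) (slow : Int) (seen : PySem.Set Int) : Nat → Int
  | 0 => slow
  | fuel + 1 =>
    if PySem.Set.contains seen slow then slow
    else walkSeen arr (pyf arr slow) (PySem.Set.add seen slow) fuel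

def finding_only_duplicate_alt (arr : List Int) : Int :=
  walkSeen arr (pyf arr 0) PySem.Set.empty (arr.length + 1)

-- ===== PRECONDITION & SPEC =====
-- Pre_ excludes lists containing a value that is not a valid Python index into arr: A raises
-- IndexError once the walk reaches such a value, but happens to return (the same value as B)
-- when the walk never reaches it — whether it is reached is only decidable by re-running the walk,
-- so Pre_ conservatively requires every value to be a valid (possibly negative) index.
def Pre_finding_only_duplicate (arr : List Int) : Prop :=
  arr ≠ [] ∧ ∀ y ∈ arr, PySem.Raise.InRange arr.length y
instance (arr : List Int) : Decidable (Pre_finding_only_duplicate arr) := by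
  unfold Pre_finding_only_duplicate; infer_instance

def pvWitness_finding_only_duplicate : List Int := [1, 3, 4, 2, 2]

def Spec_finding_only_duplicate (arr : List Int) (out : Int) : Prop := out = finding_only_duplicate_alt arr
instance (arr : List Int) (out : Int) : Decidable (Spec_finding_only_duplicate arr out) := by unfold Spec_finding_only_duplicate; infer_instance

-- ===== CLAIM (what is proved, stated in full; the proofs are below) =====
def Claim_equal_finding_only_duplicate : Prop := ∀ (arr : List Int), Dom_finding_only_duplicate arr → Pre_finding_only_duplicate arr → Spec_finding_only_duplicate arr (finding_only_duplicate arr)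

-- ===== LEMMAS AND PROOFS =====

-- xw arr k = value after k steps of the index-chasing map, starting at the first element
noncomputable def xw (arr : List Int) (k : Nat) : Int := (pyf arr)^[k] (pyf arr 0)

-- Jof = first step whose value already occurred; muOf = the earlier step with that value;
-- lamOf = cycle length
noncomputable def Jof (arr : List Int) : Nat := sInf {j | ∃ i, i < j ∧ xw arr i = xw arr j}
noncomputable def muOf (arr : List Int) : Nat := sInf {i | i < Jof arr ∧ xw arr i = xw arr (Jof arr)}
noncomputable def lamOf (arr : List Int) : Nat := Jof arr - muOf arr

theorem xw_succ (arr : List Int) (k : Nat) : xw arr (k + 1) = pyf arr (xw arr k) := by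
  simp [xw, Function.iterate_succ_apply']

theorem xw_add (arr : List Int) (a b : Nat) : xw arr (a + b) = (pyf arr)^[a] (xw arr b) := by
  simp [xw, Function.iterate_add_apply]

theorem xw_mem (arr : List Int) (h : Pre_finding_only_duplicate arr) (k : Nat) :
    xw arr k ∈ arr := by
  induction k with
  | zero =>
    have hlen : 0 < arr.length := List.length_pos_iff.mpr h.1
    have : PySem.Raise.InRange arr.length 0 := ⟨by omega, by exact_mod_cast hlen⟩
    exact PySem.List.pyGetD_mem arr 0 this
  | succ k ih =>
    rw [xw_succ]
    exact PySem.List.pyGetD_mem arr 0 (h.2 _ ih)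

theorem exists_repeat (arr : List Int) (h : Pre_finding_only_duplicate arr) :
    ∃ j, (∃ i, i < j ∧ xw arr i = xw arr j) ∧ j ≤ arr.length := by
  have hcard : arr.toFinset.card < (Finset.univ : Finset (Fin (arr.length + 1))).card := by
    have := List.toFinset_card_le arr
    simp only [Finset.card_univ, Fintype.card_fin]
    omega
  have hmaps : Set.MapsTo (fun k : Fin (arr.length + 1) => xw arr k.1)
      ↑(Finset.univ : Finset (Fin (arr.length + 1))) ↑arr.toFinset := by
    intro k _
    simp only [List.coe_toFinset, Set.mem_setOf_eq]
    exact xw_mem arr h k.1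
  obtain ⟨a, -, b, -, hab, heq⟩ := Finset.exists_ne_map_eq_of_card_lt_of_maps_to hcard hmaps
  rcases lt_or_gt_of_ne (fun hv => hab (Fin.ext hv) : a.1 ≠ b.1) with hlt | hlt
  · exact ⟨b.1, ⟨a.1, hlt, heq⟩, by omega⟩
  · exact ⟨a.1, ⟨b.1, hlt, heq.symm⟩, by omega⟩

theorem J_spec (arr : List Int) (h : Pre_finding_only_duplicate arr) :
    ∃ i, i < Jof arr ∧ xw arr i = xw arr (Jof arr) := by
  obtain ⟨j, hj, -⟩ := exists_repeat arr h
  exact Nat.sInf_mem (⟨j, hj⟩ : {j | ∃ i, i < j ∧ xw arr i = xw arr j}.Nonempty)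

theorem J_le (arr : List Int) (h : Pre_finding_only_duplicate arr) : Jof arr ≤ arr.length := by
  obtain ⟨j, hj, hle⟩ := exists_repeat arr h
  exact le_trans (Nat.sInf_le hj) hle

theorem J_min (arr : List Int) {i j : Nat} (hij : i < j) (hj : j < Jof arr) :
    xw arr i ≠ xw arr j := by
  intro heq
  exact Nat.notMem_of_lt_sInf hj ⟨i, hij, heq⟩

theorem mu_spec (arr : List Int) (h : Pre_finding_only_duplicate arr) :
    muOf arr < Jof arr ∧ xw arr (muOf arr) = xw arr (Jof arr) :=
  Nat.sInf_mem (J_spec arr h)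

theorem mu_add_lam (arr : List Int) (h : Pre_finding_only_duplicate arr) :
    muOf arr + lamOf arr = Jof arr := by
  have := (mu_spec arr h).1
  unfold lamOf; omega

theorem lam_pos (arr : List Int) (h : Pre_finding_only_duplicate arr) : 0 < lamOf arr := by
  have := (mu_spec arr h).1
  unfold lamOf; omega

-- periodicity: after the tail, the walk repeats with period lamOf
theorem xw_period (arr : List Int) (h : Pre_finding_only_duplicate arr) {k : Nat}
    (hk : muOf arr ≤ k) : xw arr (k + lamOf arr) = xw arr k := by
  have h1 : k + lamOf arr = (k - muOf arr) + (muOf arr + lamOf arr) := by omega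
  have h2 : k = (k - muOf arr) + muOf arr := by omega
  rw [h1, xw_add, mu_add_lam arr h, ← (mu_spec arr h).2, ← xw_add, ← h2]

theorem xw_period_mul (arr : List Int) (h : Pre_finding_only_duplicate arr) {k : Nat}
    (hk : muOf arr ≤ k) (q : Nat) : xw arr (k + lamOf arr * q) = xw arr k := by
  induction q with
  | zero => simp
  | succ q ih =>
    have : k + lamOf arr * (q + 1) = (k + lamOf arr * q) + lamOf arr := by ring
    rw [this, xw_period arr h (by omega), ih]

theorem xw_period_dvd (arr : List Int) (h : Pre_finding_only_duplicate arr) {k d : Nat}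
    (hk : muOf arr ≤ k) (hd : lamOf arr ∣ d) : xw arr (k + d) = xw arr k := by
  obtain ⟨q, rfl⟩ := hd
  exact xw_period_mul arr h hk q

-- characterization of equal walk values
theorem xw_eq_char (arr : List Int) (h : Pre_finding_only_duplicate arr) :
    ∀ j i, i ≤ j → xw arr i = xw arr j →
      i = j ∨ (muOf arr ≤ i ∧ lamOf arr ∣ (j - i)) := by
  intro j
  induction j using Nat.strong_induction_on with
  | _ j ih =>
    intro i hij heq
    rcases Nat.eq_or_lt_of_le hij with rfl | hlt
    · exact Or.inl rfl
    rcases Nat.lt_or_ge j (Jof arr) with hjJ | hjJ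
    · exact absurd heq (J_min arr hlt hjJ)
    · -- j ≥ J = μ + λ : fold j down by one period
      have hJ := mu_add_lam arr h
      have hlp := lam_pos arr h
      have hjm : muOf arr ≤ j - lamOf arr := by omega
      have hstep : xw arr (j - lamOf arr) = xw arr j := by
        have h' := xw_period arr h hjm
        rw [Nat.sub_add_cancel (by omega)] at h'
        exact h'.symm
      rcases Nat.lt_or_ge (j - lamOf arr) i with higt | hile
      · -- j - λ < i < j
        have := ih i (by omega) (j - lamOf arr) (by omega) (hstep.trans heq.symm)
        rcases this with hEq | ⟨-, q, hq⟩
        · exact Or.inr ⟨by omega, ⟨1, by omega⟩⟩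
        · -- i - (j - λ) is a positive multiple of λ smaller than λ: impossible unless q = 0
          rcases q with - | q
          · simp only [Nat.mul_zero] at hq
            omega
          · have : lamOf arr * (q + 1) ≥ lamOf arr := by
              have := Nat.le_mul_of_pos_right (lamOf arr) (Nat.succ_pos q)
              omega
            omega

      · have := ih (j - lamOf arr) (by omega) i hile (heq.trans hstep.symm)
        rcases this with rfl | ⟨hmu, q, hq⟩
        · exact Or.inr ⟨hjm, ⟨1, by omega⟩⟩
        · have hx : lamOf arr * (q + 1) = lamOf arr * q + lamOf arr := by ring
          exact Or.inr ⟨hmu, ⟨q + 1, by omega⟩⟩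
-- the meeting point of phase 1
noncomputable def t1Of (arr : List Int) : Nat := sInf {t | 1 ≤ t ∧ xw arr t = xw arr (2 * t)}

theorem meet_of (arr : List Int) (h : Pre_finding_only_duplicate arr) {t : Nat}
    (h1 : muOf arr ≤ t) (h2 : lamOf arr ∣ t) : xw arr t = xw arr (2 * t) := by
  have : 2 * t = t + t := by ring
  rw [this, xw_period_dvd arr h h1 h2]

theorem t1_exists (arr : List Int) (h : Pre_finding_only_duplicate arr) :
    ∃ t, (1 ≤ t ∧ xw arr t = xw arr (2 * t)) ∧ t ≤ Jof arr := by
  have hlp := lam_pos arr h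
  have hJ := mu_add_lam arr h
  have hdm := Nat.div_add_mod (muOf arr - 1) (lamOf arr)
  have hml := Nat.mod_lt (muOf arr - 1) hlp
  have hexp : lamOf arr * ((muOf arr - 1) / lamOf arr + 1)
      = lamOf arr * ((muOf arr - 1) / lamOf arr) + lamOf arr := by ring
  refine ⟨lamOf arr * ((muOf arr - 1) / lamOf arr + 1), ⟨by omega, ?_⟩, by omega⟩
  exact meet_of arr h (by omega) (Dvd.intro _ rfl)

theorem t1_spec (arr : List Int) (h : Pre_finding_only_duplicate arr) :
    1 ≤ t1Of arr ∧ xw arr (t1Of arr) = xw arr (2 * t1Of arr) := by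
  obtain ⟨t, ht, -⟩ := t1_exists arr h
  exact Nat.sInf_mem (⟨t, ht⟩ : {t | 1 ≤ t ∧ xw arr t = xw arr (2 * t)}.Nonempty)

theorem t1_le_J (arr : List Int) (h : Pre_finding_only_duplicate arr) :
    t1Of arr ≤ Jof arr := by
  obtain ⟨t, ht, hle⟩ := t1_exists arr h
  exact le_trans (Nat.sInf_le ht) hle

theorem t1_min (arr : List Int) {t : Nat} (h1 : 1 ≤ t) (h2 : t < t1Of arr) :
    xw arr t ≠ xw arr (2 * t) := fun heq => Nat.notMem_of_lt_sInf h2 ⟨h1, heq⟩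

theorem t1_char (arr : List Int) (h : Pre_finding_only_duplicate arr) :
    muOf arr ≤ t1Of arr ∧ lamOf arr ∣ t1Of arr := by
  obtain ⟨h1, heq⟩ := t1_spec arr h
  have := xw_eq_char arr h (2 * t1Of arr) (t1Of arr) (by omega) heq
  rcases this with hEq | ⟨hmu, hdvd⟩
  · omega
  · have : 2 * t1Of arr - t1Of arr = t1Of arr := by omega
    rw [this] at hdvd
    exact ⟨hmu, hdvd⟩

-- phase-1 loop invariant: starting from (x k, x 2k) with enough fuel, it returns x t1
theorem phase1_run (arr : List Int) (h : Pre_finding_only_duplicate arr) :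
    ∀ (fuel k : Nat), k < t1Of arr → t1Of arr ≤ k + fuel →
      floydPhase1 arr (xw arr k) (xw arr (2 * k)) fuel = xw arr (t1Of arr) := by
  intro fuel
  induction fuel with
  | zero => intro k h1 h2; omega
  | succ fuel ih =>
    intro k h1 h2
    have hs : pyf arr (xw arr k) = xw arr (k + 1) := (xw_succ arr k).symm
    have hf : pyf arr (pyf arr (xw arr (2 * k))) = xw arr (2 * (k + 1)) := by
      rw [show 2 * (k + 1) = (2 * k + 1) + 1 by ring, xw_succ, xw_succ]
    simp only [floydPhase1, hs, hf]
    by_cases hEq : k + 1 = t1Of arr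
    · rw [if_pos (by rw [hEq]; exact (t1_spec arr h).2), hEq]
    · have hlt : k + 1 < t1Of arr := by omega
      rw [if_neg (t1_min arr (by omega) hlt), ih (k + 1) hlt (by omega)]

-- phase-2 loop invariant: starting from (x (t1+m), x m) with m ≤ μ, it returns x μ
theorem phase2_run (arr : List Int) (h : Pre_finding_only_duplicate arr) :
    ∀ (fuel m : Nat), m ≤ muOf arr → muOf arr ≤ m + fuel →
      floydPhase2 arr (xw arr (t1Of arr + m)) (xw arr m) fuel = xw arr (muOf arr) := by
  have hchar := t1_char arr h
  have hmeet : xw arr (t1Of arr + muOf arr) = xw arr (muOf arr) := by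
    rw [Nat.add_comm]
    exact xw_period_dvd arr h (le_refl _) hchar.2
  intro fuel
  induction fuel with
  | zero =>
    intro m h1 h2
    have : m = muOf arr := by omega
    subst this
    rw [floydPhase2]  -- fuel 0 returns slow
    exact hmeet
  | succ fuel ih =>
    intro m h1 h2
    rcases Nat.eq_or_lt_of_le h1 with rfl | hlt
    · rw [floydPhase2, if_neg]
      · exact hmeet
      · simp only [ne_eq, not_not]
        exact hmeet
    · have hne : xw arr (t1Of arr + m) ≠ xw arr m := by
        intro heq
        have := xw_eq_char arr h (t1Of arr + m) m (by omega) heq.symm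
        rcases this with hEq | ⟨hmu, -⟩
        · have := (t1_spec arr h).1; omega
        · omega
      rw [floydPhase2, if_pos (by exact fun hc => hne hc)]
      have hs : pyf arr (xw arr (t1Of arr + m)) = xw arr (t1Of arr + (m + 1)) := by
        rw [show t1Of arr + (m + 1) = (t1Of arr + m) + 1 by ring, xw_succ]
      have hf : pyf arr (xw arr m) = xw arr (m + 1) := (xw_succ arr m).symm
      rw [hs, hf]
      exact ih (m + 1) hlt (by omega)

-- B's loop invariant: seen holds exactly the values x 0 … x (j-1); returns x J
theorem walk_run (arr : List Int) (h : Pre_finding_only_duplicate arr) :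
    ∀ (fuel j : Nat) (seen : PySem.Set Int), j ≤ Jof arr → Jof arr ≤ j + fuel →
      (∀ y : Int, y ∈ seen ↔ ∃ i, i < j ∧ xw arr i = y) →
      walkSeen arr (xw arr j) seen fuel = xw arr (Jof arr) := by
  intro fuel
  induction fuel with
  | zero =>
    intro j seen h1 h2 hseen
    have : j = Jof arr := by omega
    subst this
    rw [walkSeen]
  | succ fuel ih =>
    intro j seen h1 h2 hseen
    rw [walkSeen]
    rcases Nat.eq_or_lt_of_le h1 with rfl | hlt
    · rw [if_pos]
      rw [PySem.Set.contains_iff, hseen]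
      exact J_spec arr h
    · have hc : ¬ (PySem.Set.contains seen (xw arr j) = true) := by
        rw [PySem.Set.contains_iff, hseen]
        rintro ⟨i, hi, heq⟩
        exact J_min arr hi hlt heq
      rw [if_neg hc, ← xw_succ]
      refine ih (j + 1) (PySem.Set.add seen (xw arr j)) hlt (by omega) ?_
      intro y
      rw [PySem.Set.mem_add, hseen]
      constructor
      · rintro (⟨i, hi, rfl⟩ | rfl)
        · exact ⟨i, by omega, rfl⟩
        · exact ⟨j, by omega, rfl⟩
      · rintro ⟨i, hi, rfl⟩
        rcases Nat.lt_or_ge i j with hij | hij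
        · exact Or.inl ⟨i, hij, rfl⟩
        · have : i = j := by omega
          subst this
          exact Or.inr rfl

theorem A_eq_xmu (arr : List Int) (h : Pre_finding_only_duplicate arr) :
    finding_only_duplicate arr = xw arr (muOf arr) := by
  have hx0 : pyf arr 0 = xw arr 0 := rfl
  have hJn := J_le arr h
  have ht1 := t1_le_J arr h
  have ht1p := (t1_spec arr h).1
  have hmu := (mu_spec arr h).1
  unfold finding_only_duplicate
  simp only [hx0]
  have h20 : xw arr 0 = xw arr (2 * 0) := by norm_num
  rw [show floydPhase1 arr (xw arr 0) (xw arr 0) (arr.length + 1)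
        = floydPhase1 arr (xw arr 0) (xw arr (2 * 0)) (arr.length + 1) by rw [← h20]]
  rw [phase1_run arr h (arr.length + 1) 0 (by omega) (by omega)]
  rw [show xw arr (t1Of arr) = xw arr (t1Of arr + 0) by norm_num]
  exact phase2_run arr h (arr.length + 1) 0 (by omega) (by omega)

theorem B_eq_xmu (arr : List Int) (h : Pre_finding_only_duplicate arr) :
    finding_only_duplicate_alt arr = xw arr (muOf arr) := by
  have hJn := J_le arr h
  unfold finding_only_duplicate_alt
  have hx0 : pyf arr 0 = xw arr 0 := rfl
  rw [hx0, walk_run arr h (arr.length + 1) 0 PySem.Set.empty (by omega) (by omega)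
        (by intro y; simp [PySem.Set.empty])]
  exact ((mu_spec arr h).2).symm

-- ===== VERDICT (by name: the statement is the Claim_ definition above) =====
theorem finding_only_duplicate_spec : Claim_equal_finding_only_duplicate := by
  intro arr _ hpre
  unfold Spec_finding_only_duplicate
  rw [A_eq_xmu arr hpre, B_eq_xmu arr hpre]
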